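-- pv_equiv track=rewrite | github.com/MaxTezza/MaxOS | max_os/learning/prompt_filter.py | _make_formal
-- ===== SOURCE A (Python) =====
-- def _make_formal(message: str) -> str:
--     """Make message more formal."""
--     # Expand contractions
--     replacements = {
--         "can't": 'cannot',
--         "isn't": 'is not',
--         "aren't": 'are not',
--         "doesn't": 'does not',
--         "don't": 'do not',
--         "won't": 'will not',
--         "haven't": 'have not',
--     }
--
--     for casual, formal in replacements.items():
--         message = message.replace(casual, formal)
--
--     return message
-- ===== SOURCE B (Python) =====
-- def _make_formal(message: str) -> str:
--     """Make message more formal."""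
--     replacements = {
--         "can't": 'cannot',
--         "isn't": 'is not',
--         "aren't": 'are not',
--         "doesn't": 'does not',
--         "don't": 'do not',
--         "won't": 'will not',
--         "haven't": 'have not',
--     }
--     keys = sorted(replacements, key=len, reverse=True)
--     out = []
--     i = 0
--     n = len(message)
--     while i < n:
--         for k in keys:
--             if message.startswith(k, i):
--                 out.append(replacements[k])
--                 i += len(k)
--                 break
--         else:
--             out.append(message[i])
--             i += 1
--     return ''.join(out)
-- ===== Notes on version B (the rewrite author's own statement) =====
-- stated objective: alternative
-- what changed: Replaces A's seven sequential whole-string str.replace passes by a single left-to-right scan that at each position tries the contraction keys (longest first) and emits either an expansion or the current character.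
import Mathlib
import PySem

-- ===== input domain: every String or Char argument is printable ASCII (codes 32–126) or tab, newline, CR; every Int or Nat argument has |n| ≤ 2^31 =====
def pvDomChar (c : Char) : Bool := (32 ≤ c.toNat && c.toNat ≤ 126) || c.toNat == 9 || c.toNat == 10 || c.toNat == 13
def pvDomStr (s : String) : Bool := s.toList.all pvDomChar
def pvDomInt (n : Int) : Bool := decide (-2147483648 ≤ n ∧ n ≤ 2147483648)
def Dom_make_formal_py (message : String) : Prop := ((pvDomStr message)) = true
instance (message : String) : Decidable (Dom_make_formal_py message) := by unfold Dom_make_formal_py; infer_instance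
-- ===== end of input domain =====

-- B replaces A's seven sequential str.replace passes by one left-to-right scan that tries
-- the contraction keys (longest first) at each position; same return value, an alternative
-- single-pass decomposition (no speed claim).

-- ===== PORT A =====
-- the replacements dict, in insertion order
def pvReplA : List (String × String) :=
  [("can't", "cannot"), ("isn't", "is not"), ("aren't", "are not"),
   ("doesn't", "does not"), ("don't", "do not"), ("won't", "will not"),
   ("haven't", "have not")]

-- 'for casual, formal in replacements.items(): message = message.replace(casual, formal)'
def make_formal_py (message : String) : String :=
  pvReplA.foldl (fun m p => PySem.Str.replace m p.1 p.2) message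

-- ===== PORT B =====
-- 'keys = sorted(replacements, key=len, reverse=True)', paired with their expansions (char level)
def pvTblB : List (List Char × List Char) :=
  [("doesn't".toList, "does not".toList), ("haven't".toList, "have not".toList),
   ("aren't".toList, "are not".toList), ("can't".toList, "cannot".toList),
   ("isn't".toList, "is not".toList), ("don't".toList, "do not".toList),
   ("won't".toList, "will not".toList)]

-- the while/for-else loop of Source B: at each position try the keys in order; on a match emit
-- the expansion and skip the key's length, otherwise emit the character and move on.
-- The 'if _hp' branch is only a totality guard (all keys of pvTblB are nonempty).
def pvScan (tbl : List (List Char × List Char)) : List Char → List Char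
  | [] => []
  | c :: t =>
    match tbl.find? (fun q => q.1.isPrefixOf (c :: t)) with
    | some q =>
      if _hp : q.1.length = 0 then c :: pvScan tbl t
      else q.2 ++ pvScan tbl ((c :: t).drop q.1.length)
    | none => c :: pvScan tbl t
termination_by l => l.length
decreasing_by all_goals (simp [List.length_drop] <;> omega)

def make_formal_py_alt (message : String) : String :=
  String.ofList (pvScan pvTblB message.toList)

-- ===== PRECONDITION & SPEC =====
def Spec_make_formal_py (message : String) (out : String) : Prop := out = make_formal_py_alt message
instance (message : String) (out : String) : Decidable (Spec_make_formal_py message out) := by unfold Spec_make_formal_py; infer_instance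

-- ===== CLAIM (what is proved, stated in full; the proofs are below) =====
def Claim_equal_make_formal_py : Prop := ∀ (message : String), Dom_make_formal_py message → Spec_make_formal_py message (make_formal_py message)

-- ===== LEMMAS AND PROOFS =====

-- structural (length-recursion) rephrasing of PySem.Chars.replace for a nonempty pattern
def pvRepc (old new : List Char) : List Char → List Char
  | [] => []
  | c :: t =>
    if old.isPrefixOf (c :: t) then
      if _hp : old.length = 0 then c :: pvRepc old new t
      else new ++ pvRepc old new ((c :: t).drop old.length)
    else c :: pvRepc old new t
termination_by l => l.length
decreasing_by all_goals (simp [List.length_drop] <;> omega)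

-- unfolding lemmas ------------------------------------------------------------

theorem pvRepc_nil (old new : List Char) : pvRepc old new [] = [] := by
  rw [pvRepc]

theorem pvRepc_pos (old new : List Char) (c : Char) (t : List Char)
    (h : old <+: (c :: t)) (h0 : old ≠ []) :
    pvRepc old new (c :: t) = new ++ pvRepc old new ((c :: t).drop old.length) := by
  rw [pvRepc]
  rw [if_pos (List.isPrefixOf_iff_prefix.mpr h)]
  rw [dif_neg (by simpa [List.length_eq_zero_iff] using h0)]

theorem pvRepc_neg (old new : List Char) (c : Char) (t : List Char)
    (h : ¬ old <+: (c :: t)) :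
    pvRepc old new (c :: t) = c :: pvRepc old new t := by
  rw [pvRepc]
  rw [if_neg (by simpa [List.isPrefixOf_iff_prefix] using h)]

theorem pvScan_nil (tbl : List (List Char × List Char)) : pvScan tbl [] = [] := by
  rw [pvScan]

theorem pvScan_some (tbl : List (List Char × List Char)) (c : Char) (t : List Char)
    (q : List Char × List Char)
    (h : tbl.find? (fun q => q.1.isPrefixOf (c :: t)) = some q) (h0 : q.1 ≠ []) :
    pvScan tbl (c :: t) = q.2 ++ pvScan tbl ((c :: t).drop q.1.length) := by
  rw [pvScan, h]
  have hq : q.1.length ≠ 0 := by simpa [List.length_eq_zero_iff] using h0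
  simp [hq]

theorem pvScan_none (tbl : List (List Char × List Char)) (c : Char) (t : List Char)
    (h : tbl.find? (fun q => q.1.isPrefixOf (c :: t)) = none) :
    pvScan tbl (c :: t) = c :: pvScan tbl t := by
  rw [pvScan, h]

-- PySem.Chars.replace coincides with pvRepc for a nonempty pattern ------------

theorem pvGo_eq (old new : List Char) (hold : old ≠ []) :
    ∀ fuel l acc, l.length ≤ fuel →
      PySem.Chars.replace.go old new fuel l acc = acc.reverse ++ pvRepc old new l := by
  intro fuel
  induction fuel with
  | zero =>
    intro l acc h
    have hl : l = [] := by cases l <;> simp_all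
    subst hl
    simp [PySem.Chars.replace.go, pvRepc_nil]
  | succ n ih =>
    intro l acc h
    cases l with
    | nil => simp [PySem.Chars.replace.go, pvRepc_nil]
    | cons c t =>
      rw [PySem.Chars.replace.go]
      by_cases hpre : old.isPrefixOf (c :: t)
      · rw [if_pos hpre]
        have hlen : 0 < old.length := by
          cases old with
          | nil => exact absurd rfl hold
          | cons _ _ => simp
        have hd : ((c :: t).drop old.length).length ≤ n := by
          simp only [List.length_drop]
          simp at h ⊢; omega
        rw [ih _ _ hd]
        rw [pvRepc_pos old new c t (List.isPrefixOf_iff_prefix.mp hpre) hold]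
        simp
      · rw [if_neg hpre]
        have ht : t.length ≤ n := by simp at h; omega
        rw [ih _ _ ht]
        rw [pvRepc_neg old new c t (fun hp => hpre (List.isPrefixOf_iff_prefix.mpr hp))]
        simp

theorem pvReplace_eq (old new l : List Char) (hold : old ≠ []) :
    PySem.Chars.replace l old new = pvRepc old new l := by
  rw [PySem.Chars.replace]
  rw [if_neg (by simpa [List.isEmpty_iff] using hold)]
  simpa using pvGo_eq old new hold l.length l [] le_rfl

-- the side conditions under which sequential replaces equal the single scan ---

def pvConds (tbl : List (List Char × List Char)) : Prop :=
  (tbl.map Prod.fst).Nodup ∧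
  (∀ p ∈ tbl, p.1 ≠ []) ∧
  (∀ p ∈ tbl, ∀ q ∈ tbl, p.1 <+: q.1 → p.1 = q.1) ∧
  (∀ p ∈ tbl, ∀ q ∈ tbl, ∀ s ∈ p.2.tails, s ≠ [] → ¬ q.1 <+: s ∧ ¬ s <+: q.1) ∧
  (∀ p ∈ tbl, ∀ q ∈ tbl, ∀ s ∈ p.1.tails, s ≠ [] → s <+: q.1 → s = p.1) ∧
  (∀ p ∈ tbl, ∀ q ∈ tbl, ∀ s ∈ p.1.tails, s ≠ [] → ¬ s <+: q.2 ∧ ¬ q.2 <+: s) ∧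
  (∀ p ∈ tbl, ∀ q ∈ tbl, ∀ s ∈ q.1.tails, p.1 <+: s → s = q.1)

theorem pvConds_tail (p : List Char × List Char) (rest : List (List Char × List Char))
    (h : pvConds (p :: rest)) : pvConds rest := by
  obtain ⟨h0, h1, h2, h3, h4, h5, h6⟩ := h
  rw [List.map_cons] at h0
  refine ⟨(List.nodup_cons.mp h0).2, ?_, ?_, ?_, ?_, ?_, ?_⟩ <;>
    intro a ha <;>
    first
      | exact h1 a (List.mem_cons_of_mem _ ha)
      | (intro b hb
         first
           | exact h2 a (List.mem_cons_of_mem _ ha) b (List.mem_cons_of_mem _ hb)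
           | exact h3 a (List.mem_cons_of_mem _ ha) b (List.mem_cons_of_mem _ hb)
           | exact h4 a (List.mem_cons_of_mem _ ha) b (List.mem_cons_of_mem _ hb)
           | exact h5 a (List.mem_cons_of_mem _ ha) b (List.mem_cons_of_mem _ hb)
           | exact h6 a (List.mem_cons_of_mem _ ha) b (List.mem_cons_of_mem _ hb))

-- nodup keys make the key map injective on members
theorem pvNodupInj (tbl : List (List Char × List Char))
    (h : (tbl.map Prod.fst).Nodup) :
    ∀ a ∈ tbl, ∀ b ∈ tbl, a.1 = b.1 → a = b := by
  induction tbl with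
  | nil => intro a ha; simp at ha
  | cons x xs ih =>
    rw [List.map_cons] at h
    have hn1 : x.1 ∉ xs.map Prod.fst := (List.nodup_cons.mp h).1
    have hn2 : (xs.map Prod.fst).Nodup := (List.nodup_cons.mp h).2
    intro a ha b hb he
    rcases List.mem_cons.mp ha with hax | ha <;> rcases List.mem_cons.mp hb with hbx | hb
    · rw [hax, hbx]
    · exact absurd (by rw [hax] at he; rw [he]; exact List.mem_map_of_mem hb) hn1
    · exact absurd (by rw [hbx] at he; rw [← he]; exact List.mem_map_of_mem ha) hn1
    · exact ih hn2 a ha b hb he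

-- at most one key of a prefix-free nodup table matches at a given position
theorem pvUniq (tbl : List (List Char × List Char)) (h : pvConds tbl)
    (q : List Char × List Char) (hq : q ∈ tbl) (l : List Char) (hql : q.1 <+: l) :
    ∀ r ∈ tbl, r.1 <+: l → r = q := by
  intro r hr hrl
  rcases List.prefix_or_prefix_of_prefix hrl hql with hc | hc
  · exact pvNodupInj tbl h.1 r hr q hq (h.2.2.1 r hr q hq hc)
  · exact (pvNodupInj tbl h.1 q hq r hr (h.2.2.1 q hq r hr hc)).symm

theorem pvFindSome (tbl : List (List Char × List Char)) (P : List Char × List Char → Bool)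
    (q : List Char × List Char) (hq : q ∈ tbl) (hP : P q = true)
    (huniq : ∀ r ∈ tbl, P r = true → r = q) :
    tbl.find? P = some q := by
  induction tbl with
  | nil => simp at hq
  | cons x xs ih =>
    rcases List.mem_cons.mp hq with h | h
    · rw [h] at hP ⊢; exact List.find?_cons_of_pos hP
    · by_cases hx : P x = true
      · have hxq : x = q := huniq x (by simp) hx
        rw [List.find?_cons_of_pos hx, hxq]
      · rw [List.find?_cons_of_neg hx]
        exact ih h (fun r hr => huniq r (List.mem_cons_of_mem _ hr))

-- a key matching a prefix of u ++ m lies in u or swallows u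
theorem pvPrefApp (k u m : List Char) (h : k <+: u ++ m) : k <+: u ∨ u <+: k :=
  List.prefix_or_prefix_of_prefix h (List.prefix_append u m)

-- S1: the scan walks inertly over a block no key can touch
theorem pvScanInert (tbl : List (List Char × List Char)) :
    ∀ u m, (∀ s ∈ u.tails, s ≠ [] → ∀ q ∈ tbl, ¬ q.1 <+: s ∧ ¬ s <+: q.1) →
      pvScan tbl (u ++ m) = u ++ pvScan tbl m := by
  intro u
  induction u with
  | nil => intro m _; simp
  | cons c u' ih =>
    intro m hcond
    have hnone : tbl.find? (fun q => q.1.isPrefixOf (c :: u' ++ m)) = none := by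
      rw [List.find?_eq_none]
      intro q hq hP
      have hpre : q.1 <+: (c :: u') ++ m := by
        simpa [List.isPrefixOf_iff_prefix] using hP
      have hs : (c :: u') ∈ (c :: u').tails := by
        rw [List.mem_tails]
      rcases pvPrefApp q.1 (c :: u') m hpre with hc | hc
      · exact (hcond (c :: u') hs (by simp) q hq).1 hc
      · exact (hcond (c :: u') hs (by simp) q hq).2 hc
    rw [List.cons_append, pvScan_none tbl c (u' ++ m) hnone]
    rw [ih m (fun s hs hsne q hq =>
      hcond s (by rw [List.mem_tails] at hs ⊢; exact hs.trans (List.suffix_cons c u')) hsne q hq)]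
    simp

-- S2: a replace walks inertly over a block its pattern cannot touch
theorem pvRepcInert (old new : List Char) (_hold : old ≠ []) :
    ∀ u m, (∀ s ∈ u.tails, s ≠ [] → ¬ old <+: s ∧ ¬ s <+: old) →
      pvRepc old new (u ++ m) = u ++ pvRepc old new m := by
  intro u
  induction u with
  | nil => intro m _; simp
  | cons c u' ih =>
    intro m hcond
    have hnp : ¬ old <+: (c :: u') ++ m := by
      intro hpre
      have hs : (c :: u') ∈ (c :: u').tails := by rw [List.mem_tails]
      rcases pvPrefApp old (c :: u') m hpre with hc | hc
      · exact (hcond (c :: u') hs (by simp)).1 hc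
      · exact (hcond (c :: u') hs (by simp)).2 hc
    rw [List.cons_append, pvRepc_neg old new c (u' ++ m) hnp]
    rw [ih m (fun s hs hsne =>
      hcond s (by rw [List.mem_tails] at hs ⊢; exact hs.trans (List.suffix_cons c u')) hsne)]
    simp

-- S3: replacing cannot create a fresh match of an unrelated key at the front
theorem pvRepcNoPrefix (old new q1 : List Char) (hold : old ≠ [])
    (hcond : ∀ s ∈ q1.tails, s ≠ [] → ¬ s <+: new ∧ ¬ new <+: s) :
    ∀ l s, s <:+ q1 → s ≠ [] → ¬ s <+: l → ¬ s <+: pvRepc old new l := by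
  intro l
  induction l with
  | nil => intro s _ _ hnl; rw [pvRepc_nil]; exact hnl
  | cons c t ih =>
    intro s hsq hsne hnl hcontra
    by_cases hpre : old <+: (c :: t)
    · rw [pvRepc_pos old new c t hpre hold] at hcontra
      rcases pvPrefApp s new (pvRepc old new ((c :: t).drop old.length)) hcontra with hc | hc
      · exact (hcond s (List.mem_tails _ _ |>.mpr hsq) hsne).1 hc
      · exact (hcond s (List.mem_tails _ _ |>.mpr hsq) hsne).2 hc
    · rw [pvRepc_neg old new c t hpre] at hcontra
      cases s with
      | nil => exact hsne rfl
      | cons a s' =>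
        obtain ⟨hac, hs'⟩ := List.cons_prefix_cons.mp hcontra
        subst hac
        cases s' with
        | nil => exact hnl (by simp)
        | cons b s'' =>
          exact ih (b :: s'')
            ((List.suffix_cons a (b :: s'')).trans hsq)
            (by simp)
            (fun hp => hnl (List.cons_prefix_cons.mpr ⟨rfl, hp⟩))
            hs'

-- the key step: one replace pass followed by a scan without that key
-- equals the scan with the key included
theorem pvStep (p : List Char × List Char) (rest : List (List Char × List Char))
    (h : pvConds (p :: rest)) :
    ∀ l, pvScan rest (pvRepc p.1 p.2 l) = pvScan (p :: rest) l := by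
  obtain ⟨h0, h1, h2, h3, h4, h5, h6⟩ := h
  have hpmem : p ∈ p :: rest := List.mem_cons_self
  have hpne : p.1 ≠ [] := h1 p hpmem
  have hmain : ∀ n l, l.length ≤ n → pvScan rest (pvRepc p.1 p.2 l) = pvScan (p :: rest) l := by
    intro n
    induction n with
    | zero =>
      intro l hl
      have : l = [] := List.length_eq_zero_iff.mp (Nat.le_zero.mp hl)
      subst this; rw [pvRepc_nil, pvScan_nil, pvScan_nil]
    | succ n ih =>
      intro l hl
      cases l with
      | nil => rw [pvRepc_nil, pvScan_nil, pvScan_nil]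
      | cons c t =>
        by_cases hA : p.1 <+: (c :: t)
        · -- the head key matches here
          obtain ⟨m, hm⟩ := hA
          have hdrop : (c :: t).drop p.1.length = m := by rw [← hm]; exact List.drop_left
          rw [pvRepc_pos p.1 p.2 c t ⟨m, hm⟩ hpne, hdrop]
          rw [pvScanInert rest p.2 _ (fun s hs hsne q hq =>
            h3 p hpmem q (List.mem_cons_of_mem _ hq) s hs hsne)]
          rw [pvScan_some (p :: rest) c t p
            (List.find?_cons_of_pos (by simpa [List.isPrefixOf_iff_prefix] using ⟨m, hm⟩)) hpne]
          rw [hdrop]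
          congr 1
          exact ih m (by
            have := congrArg List.length hm
            have hp1 : 0 < p.1.length :=
              Nat.pos_of_ne_zero (by simpa [List.length_eq_zero_iff] using hpne)
            simp at this hl ⊢; omega)
        · by_cases hB : ∃ q ∈ rest, q.1 <+: (c :: t)
          · -- exactly one later key matches here
            obtain ⟨q, hq, hql⟩ := hB
            have hqmem : q ∈ p :: rest := List.mem_cons_of_mem _ hq
            have hqne : q.1 ≠ [] := h1 q hqmem
            have h0c := h0
            rw [List.map_cons] at h0c
            have hpq1 : p.1 ≠ q.1 := fun he =>
              (List.nodup_cons.mp h0c).1 (by rw [he]; exact List.mem_map_of_mem hq)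
            obtain ⟨m, hm⟩ := hql
            -- the replace pass walks inertly over q's key
            have hrep : pvRepc p.1 p.2 (c :: t) = q.1 ++ pvRepc p.1 p.2 m := by
              rw [← hm]
              refine pvRepcInert p.1 p.2 hpne q.1 m (fun s hs hsne => ⟨?_, ?_⟩)
              · intro hc
                have := h6 p hpmem q hqmem s hs hc
                rw [this] at hc
                exact hpq1 (h2 p hpmem q hqmem hc)
              · intro hc
                have := h4 q hqmem p hpmem s hs hsne hc
                rw [this] at hc
                exact hpq1 (h2 q hqmem p hpmem hc).symm
            have huniq : ∀ r ∈ p :: rest, r.1 <+: (c :: t) → r = q :=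
              pvUniq (p :: rest) ⟨h0, h1, h2, h3, h4, h5, h6⟩ q hqmem (c :: t) ⟨m, hm⟩
            -- scans on both sides pick q
            have hfind1 : rest.find? (fun r => r.1.isPrefixOf (q.1 ++ pvRepc p.1 p.2 m)) = some q := by
              refine pvFindSome rest _ q hq (by simp [List.isPrefixOf_iff_prefix, List.prefix_append]) ?_
              intro r hr hP
              have hpre : r.1 <+: q.1 ++ pvRepc p.1 p.2 m := by
                simpa [List.isPrefixOf_iff_prefix] using hP
              rcases pvPrefApp r.1 q.1 _ hpre with hc | hc
              · have := h2 r (List.mem_cons_of_mem _ hr) q hqmem hc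
                exact pvNodupInj (p :: rest) h0 r (List.mem_cons_of_mem _ hr) q hqmem this
              · have := h2 q hqmem r (List.mem_cons_of_mem _ hr) hc
                exact (pvNodupInj (p :: rest) h0 q hqmem r (List.mem_cons_of_mem _ hr) this).symm
            have hfind2 : (p :: rest).find? (fun r => r.1.isPrefixOf (c :: t)) = some q := by
              refine pvFindSome (p :: rest) _ q hqmem
                (by simpa [List.isPrefixOf_iff_prefix] using (⟨m, hm⟩ : q.1 <+: (c :: t))) ?_
              intro r hr hP
              exact huniq r hr (by simpa [List.isPrefixOf_iff_prefix] using hP)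
            -- rewrite the left scan
            cases q1eq : q.1 with
            | nil => exact absurd q1eq hqne
            | cons d u =>
              rw [hrep]
              have hfind1' : rest.find? (fun r => r.1.isPrefixOf (d :: (u ++ pvRepc p.1 p.2 m))) = some q := by
                simpa [q1eq] using hfind1
              rw [show q.1 ++ pvRepc p.1 p.2 m = d :: (u ++ pvRepc p.1 p.2 m) by rw [q1eq]; simp]
              rw [pvScan_some rest d _ q hfind1' hqne]
              rw [pvScan_some (p :: rest) c t q hfind2 hqne]
              have hdropL : (d :: (u ++ pvRepc p.1 p.2 m)).drop q.1.length = pvRepc p.1 p.2 m := by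
                rw [show d :: (u ++ pvRepc p.1 p.2 m) = q.1 ++ pvRepc p.1 p.2 m by rw [q1eq]; simp]
                exact List.drop_left
              have hdropR : (c :: t).drop q.1.length = m := by rw [← hm]; exact List.drop_left
              rw [hdropL, hdropR]
              congr 1
              refine ih m ?_
              have := congrArg List.length hm
              have hq1 : 0 < q.1.length := Nat.pos_of_ne_zero (by simpa [List.length_eq_zero_iff] using hqne)
              simp at this hl ⊢; omega
          · -- no key matches here: both scans emit one character
            simp only [not_exists, not_and] at hB
            have hrepc : pvRepc p.1 p.2 (c :: t) = c :: pvRepc p.1 p.2 t :=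
              pvRepc_neg p.1 p.2 c t hA
            have hnone1 : rest.find? (fun r => r.1.isPrefixOf (c :: pvRepc p.1 p.2 t)) = none := by
              rw [List.find?_eq_none]
              intro r hr hP
              have hpre : r.1 <+: pvRepc p.1 p.2 (c :: t) := by
                rw [hrepc]; simpa [List.isPrefixOf_iff_prefix] using hP
              exact pvRepcNoPrefix p.1 p.2 r.1 hpne
                (fun s hs hsne => h5 r (List.mem_cons_of_mem _ hr) p hpmem s hs hsne)
                (c :: t) r.1 List.suffix_rfl (h1 r (List.mem_cons_of_mem _ hr))
                (hB r hr) hpre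
            have hnone2 : (p :: rest).find? (fun r => r.1.isPrefixOf (c :: t)) = none := by
              rw [List.find?_eq_none]
              intro r hr hP
              have hpre : r.1 <+: (c :: t) := by simpa [List.isPrefixOf_iff_prefix] using hP
              rcases List.mem_cons.mp hr with h | h
              · exact hA (h ▸ hpre)
              · exact hB r h hpre
            rw [hrepc, pvScan_none rest c _ hnone1, pvScan_none (p :: rest) c t hnone2]
            congr 1
            exact ih t (by simp at hl; omega)
  intro l
  exact hmain l.length l le_rfl

theorem pvScan_nil_tbl : ∀ l, pvScan [] l = l := by
  intro l
  induction l with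
  | nil => exact pvScan_nil []
  | cons c t ih => rw [pvScan_none [] c t (by simp), ih]

theorem pvMain (tbl : List (List Char × List Char)) (h : pvConds tbl) :
    ∀ l, tbl.foldl (fun m p => pvRepc p.1 p.2 m) l = pvScan tbl l := by
  induction tbl with
  | nil => intro l; simp [pvScan_nil_tbl]
  | cons p rest ih =>
    intro l
    rw [List.foldl_cons]
    rw [ih (pvConds_tail p rest h) (pvRepc p.1 p.2 l)]
    exact pvStep p rest h l

-- scanning is insensitive to the order of a prefix-free nodup table
theorem pvScanPerm (tbl tbl' : List (List Char × List Char)) (hperm : tbl.Perm tbl')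
    (h : pvConds tbl) : ∀ l, pvScan tbl l = pvScan tbl' l := by
  have hmain : ∀ n l, l.length ≤ n → pvScan tbl l = pvScan tbl' l := by
    intro n
    induction n with
    | zero =>
      intro l hl
      have : l = [] := List.length_eq_zero_iff.mp (Nat.le_zero.mp hl)
      subst this; rw [pvScan_nil, pvScan_nil]
    | succ n ih =>
      intro l hl
      cases l with
      | nil => rw [pvScan_nil, pvScan_nil]
      | cons c t =>
        cases hfind : tbl.find? (fun q => q.1.isPrefixOf (c :: t)) with
        | some q =>
          have hq : q ∈ tbl := List.mem_of_find?_eq_some hfind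
          have hP : q.1 <+: (c :: t) := by
            simpa [List.isPrefixOf_iff_prefix] using List.find?_some hfind
          have hqne : q.1 ≠ [] := h.2.1 q hq
          have hfind' : tbl'.find? (fun r => r.1.isPrefixOf (c :: t)) = some q := by
            refine pvFindSome tbl' _ q (hperm.mem_iff.mp hq)
              (by simpa [List.isPrefixOf_iff_prefix] using hP) ?_
            intro r hr hPr
            exact pvUniq tbl h q hq (c :: t) hP r (hperm.mem_iff.mpr hr)
              (by simpa [List.isPrefixOf_iff_prefix] using hPr)
          rw [pvScan_some tbl c t q hfind hqne, pvScan_some tbl' c t q hfind' hqne]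
          congr 1
          refine ih _ ?_
          have hq1 : 0 < q.1.length := Nat.pos_of_ne_zero (by simpa [List.length_eq_zero_iff] using hqne)
          simp at hl ⊢; omega
        | none =>
          have hfind' : tbl'.find? (fun r => r.1.isPrefixOf (c :: t)) = none := by
            rw [List.find?_eq_none] at hfind ⊢
            intro r hr
            exact hfind r (hperm.mem_iff.mpr hr)
          rw [pvScan_none tbl c t hfind, pvScan_none tbl' c t hfind']
          congr 1
          exact ih t (by simp at hl; omega)
  intro l
  exact hmain l.length l le_rfl

-- A's table at char level, in dict order
def pvTblA : List (List Char × List Char) := pvReplA.map (fun p => (p.1.toList, p.2.toList))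

theorem pvCondsA : pvConds pvTblA := by
  unfold pvConds pvTblA pvReplA
  decide

theorem pvPermAB : pvTblA.Perm pvTblB := by
  unfold pvTblA pvReplA pvTblB
  decide

-- fold of string-level replaces = fold of char-level pvRepc
theorem pvFoldBridge (L : List (String × String)) (hne : ∀ p ∈ L, p.1.toList ≠ []) :
    ∀ s : String,
      (L.foldl (fun m p => PySem.Str.replace m p.1 p.2) s).toList =
        (L.map (fun p => (p.1.toList, p.2.toList))).foldl (fun m p => pvRepc p.1 p.2 m) s.toList := by
  induction L with
  | nil => intro s; simp
  | cons p rest ih =>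
    intro s
    rw [List.foldl_cons, List.map_cons, List.foldl_cons]
    rw [ih (fun q hq => hne q (List.mem_cons_of_mem _ hq))]
    congr 1
    rw [PySem.Str.toList_replace]
    exact pvReplace_eq p.1.toList p.2.toList s.toList (hne p List.mem_cons_self)

-- ===== VERDICT (by name: the statement is the Claim_ definition above) =====
theorem make_formal_py_spec : Claim_equal_make_formal_py := by
  intro message _
  unfold Spec_make_formal_py make_formal_py make_formal_py_alt
  have h1 := pvFoldBridge pvReplA (by unfold pvReplA; decide) message
  have h2 := pvMain pvTblA pvCondsA message.toList
  have h3 := pvScanPerm pvTblA pvTblB pvPermAB pvCondsA message.toList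
  have : (pvReplA.foldl (fun m p => PySem.Str.replace m p.1 p.2) message).toList =
      pvScan pvTblB message.toList := by
    rw [h1]; rw [show pvReplA.map (fun p => (p.1.toList, p.2.toList)) = pvTblA from rfl]
    rw [h2, h3]
  calc pvReplA.foldl (fun m p => PySem.Str.replace m p.1 p.2) message
      = String.ofList (pvReplA.foldl (fun m p => PySem.Str.replace m p.1 p.2) message).toList := by
        rw [String.ofList_toList]
    _ = String.ofList (pvScan pvTblB message.toList) := by rw [this]
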